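-- pv_equiv track=rewrite | github.com/little-leiry/CuPerFuzzer | critical_path.py | isDuplicated
-- ===== SOURCE A (Python) =====
-- def isDuplicated(critical_path, op_seq):
--     if ','.join(critical_path) in ','.join(op_seq): # the case absolutely contains critical path
--         return True
--     if len(critical_path) > len(op_seq): # case's operations should be more than that of critical path
--         return False
--     # the case should contain the critical path's operations
--     for op_type in ['1', '2', '3', '4']:
--         num_critical_path = critical_path.count(op_type)
--         num_op_seq = op_seq.count(op_type)
--         if num_op_seq < num_critical_path:
--             return False
--     # operations' relative positions should be the same
--     i = 0
--     while(i < len(op_seq)):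
--         if op_seq[i] == critical_path[0]:
--             if i + len(critical_path) > len(op_seq):
--                 return False
--             critical_path = critical_path[1:]
--             if len(critical_path) == 0:
--                 return True
--         i = i+1
--     return False
-- ===== SOURCE B (Python) =====
-- def _bisect_left(a, x):
--     # leftmost insertion point of x in sorted list a (hand-rolled: no imports)
--     lo, hi = 0, len(a)
--     while lo < hi:
--         mid = (lo + hi) // 2
--         if a[mid] < x:
--             lo = mid + 1
--         else:
--             hi = mid
--     return lo
--
--
-- def isDuplicated(critical_path, op_seq):
--     # containment of the comma-joined strings, exactly as in the original
--     if ','.join(critical_path) in ','.join(op_seq):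
--         return True
--     # occurrence index: op value -> sorted list of its positions in op_seq
--     positions = {}
--     for i, op in enumerate(op_seq):
--         positions.setdefault(op, []).append(i)
--     # greedily send each critical_path element to its earliest position >= nxt,
--     # found by binary search in that value's position list
--     nxt = 0
--     for op in critical_path:
--         idxs = positions.get(op, [])
--         j = _bisect_left(idxs, nxt)
--         if j == len(idxs):
--             return False
--         nxt = idxs[j] + 1
--     return True
-- ===== Notes on version B (the rewrite author's own statement) =====
-- stated objective: alternative
-- what changed: B keeps the joined-string containment test but replaces A's linear merge scan (with its length/count pre-checks and repeated list slicing) by a precomputed occurrence index (op value -> sorted list of positions) queried with a hand-rolled binary search to greedily match each critical_path element to its earliest unused position.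
import Mathlib
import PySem

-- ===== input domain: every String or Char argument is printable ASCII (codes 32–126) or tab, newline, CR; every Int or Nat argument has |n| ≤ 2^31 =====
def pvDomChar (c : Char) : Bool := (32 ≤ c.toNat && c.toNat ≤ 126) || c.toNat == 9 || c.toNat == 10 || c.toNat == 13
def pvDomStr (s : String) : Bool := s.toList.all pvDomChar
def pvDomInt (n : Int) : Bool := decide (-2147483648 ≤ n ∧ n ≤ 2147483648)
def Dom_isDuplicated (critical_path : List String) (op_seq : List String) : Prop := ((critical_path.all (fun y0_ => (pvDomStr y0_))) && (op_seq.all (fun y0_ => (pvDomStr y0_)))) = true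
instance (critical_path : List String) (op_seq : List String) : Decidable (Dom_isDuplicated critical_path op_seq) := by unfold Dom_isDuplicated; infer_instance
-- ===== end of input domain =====

-- B replaces A's linear merge scan (with its length/count pre-checks and repeated list
-- slicing) by a precomputed occurrence index (op value -> sorted position list) queried
-- with a hand-rolled binary search (objective: alternative algorithm).

-- ===== PORT A =====
-- the while loop: i-th iteration looks at op_seq[i:] = ops; 'i + len(cp) > len(op_seq)'
-- is equivalently 'cp.length > ops.length' since ops = op_seq[i:] has length len(op_seq) - i.
-- cp is never [] here (an empty critical_path already returned True at the join test), so
-- Python's critical_path[0] is ported as cp.headD "" (unreachable default).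
def pvALoop : List String → List String → Bool
  | _, [] => false
  | cp, o :: rest =>
    if o == cp.headD "" then
      if cp.length > (o :: rest).length then false
      else
        let cp' := cp.tail
        if cp'.length == 0 then true
        else pvALoop cp' rest
    else pvALoop cp rest

def isDuplicated (critical_path : List String) (op_seq : List String) : Bool :=
  if PySem.Str.isIn (PySem.Str.join "," critical_path) (PySem.Str.join "," op_seq) then true
  else if critical_path.length > op_seq.length then false
  else if (["1", "2", "3", "4"] : List String).any
      (fun op_type => PySem.List.count op_seq op_type < PySem.List.count critical_path op_type) then false
  else pvALoop critical_path op_seq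

-- ===== PORT B =====
-- _bisect_left's while loop (lo, hi are plain loop counters, always ≥ 0, hence Nat);
-- a[mid] is ported as getD (mid is always in range: lo < hi ≤ len a)
def pvBisect (a : List Int) (x : Int) (lo hi : Nat) : Nat :=
  if _h : lo < hi then
    if a.getD ((lo + hi) / 2) 0 < x then pvBisect a x ((lo + hi) / 2 + 1) hi
    else pvBisect a x lo ((lo + hi) / 2)
  else lo
termination_by hi - lo
decreasing_by all_goals omega

-- 'for i, op in enumerate(op_seq): positions.setdefault(op, []).append(i)'
-- (setdefault + in-place append = modify with default [])
def pvBuildPos (op_seq : List String) : PySem.Dict String (List Int) :=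
  (PySem.List.enumerate op_seq).foldl
    (fun d p => d.modify p.2 [] (· ++ [p.1])) PySem.Dict.empty

-- 'for op in critical_path: …' with accumulator nxt; idxs[j] via getD (j < len idxs checked)
def pvGreedy (pos : PySem.Dict String (List Int)) : List String → Int → Bool
  | [], _ => true
  | op :: rest, nxt =>
    let idxs := pos.getD op []
    let j := pvBisect idxs nxt 0 idxs.length
    if j == idxs.length then false
    else pvGreedy pos rest (idxs.getD j 0 + 1)

def isDuplicated_alt (critical_path : List String) (op_seq : List String) : Bool :=
  if PySem.Str.isIn (PySem.Str.join "," critical_path) (PySem.Str.join "," op_seq) then true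
  else pvGreedy (pvBuildPos op_seq) critical_path 0

-- ===== PRECONDITION & SPEC =====
def Spec_isDuplicated (critical_path : List String) (op_seq : List String) (out : Bool) : Prop := out = isDuplicated_alt critical_path op_seq
instance (critical_path : List String) (op_seq : List String) (out : Bool) : Decidable (Spec_isDuplicated critical_path op_seq out) := by unfold Spec_isDuplicated; infer_instance

-- ===== CLAIM (what is proved, stated in full; the proofs are below) =====
def Claim_equal_isDuplicated : Prop := ∀ (critical_path : List String) (op_seq : List String), Dom_isDuplicated critical_path op_seq → Spec_isDuplicated critical_path op_seq (isDuplicated critical_path op_seq)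

-- ===== LEMMAS AND PROOFS =====

-- proof-side reference notion: cp is a subsequence of ops (leftmost-greedy scan)
def pvIsSubseq : List String → List String → Bool
  | [], _ => true
  | _ :: _, [] => false
  | x :: xs, y :: ys => if x == y then pvIsSubseq xs ys else pvIsSubseq (x :: xs) ys

-- a subsequence is no longer than its host
theorem pvIsSubseq_length_le : ∀ (xs ys : List String), pvIsSubseq xs ys = true → xs.length ≤ ys.length := by
  intro xs ys
  induction ys generalizing xs with
  | nil => cases xs <;> simp [pvIsSubseq]
  | cons y ys ih =>
    cases xs with
    | nil => simp
    | cons x xs =>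
      simp only [pvIsSubseq]
      split_ifs with h
      · intro h'; simpa using Nat.succ_le_succ (ih xs h')
      · intro h'; exact Nat.le_trans (ih _ h') (Nat.le_succ _)

-- a subsequence has no more copies of any element than its host
theorem pvIsSubseq_count_le : ∀ (xs ys : List String) (v : String),
    pvIsSubseq xs ys = true → xs.count v ≤ ys.count v := by
  intro xs ys
  induction ys generalizing xs with
  | nil => cases xs <;> simp [pvIsSubseq]
  | cons y ys ih =>
    cases xs with
    | nil => simp
    | cons x xs =>
      intro v
      simp only [pvIsSubseq]
      split_ifs with h
      · intro h'
        have hxy : x = y := by simpa using h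
        subst hxy
        simp only [List.count_cons]
        exact Nat.add_le_add_right (ih xs v h') _
      · intro h'
        have := ih (x :: xs) v h'
        simp only [List.count_cons] at this ⊢
        omega

-- A's while loop is exactly the subsequence scan, for nonempty cp
theorem pvALoop_eq_isSubseq : ∀ (ops cp : List String), cp ≠ [] → pvALoop cp ops = pvIsSubseq cp ops := by
  intro ops
  induction ops with
  | nil => intro cp h; cases cp with
    | nil => exact absurd rfl h
    | cons c cs => rfl
  | cons o rest ih =>
    intro cp h
    cases cp with
    | nil => exact absurd rfl h
    | cons c cs =>
      simp only [pvALoop, pvIsSubseq, List.headD, List.tail]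
      by_cases hoc : o = c
      · subst hoc
        simp only [beq_self_eq_true]
        rw [if_pos trivial, if_pos trivial]
        by_cases hlen : (o :: cs).length > (o :: rest).length
        · rw [if_pos hlen]
          cases hsub : pvIsSubseq cs rest with
          | false => rfl
          | true =>
            have := pvIsSubseq_length_le cs rest hsub
            simp at hlen; omega
        · rw [if_neg hlen]
          cases cs with
          | nil => simp [pvIsSubseq]
          | cons c' cs' =>
            rw [if_neg (by simp)]
            exact ih (c' :: cs') (by simp)
      · have h1 : (o == c) = false := beq_eq_false_iff_ne.mpr hoc
        have h2 : (c == o) = false := beq_eq_false_iff_ne.mpr (Ne.symm hoc)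
        rw [h1, h2, if_neg (by simp), if_neg (by simp)]
        exact ih (c :: cs) h

-- occurrence positions of v in l, counted from n (the mathematical content of pvBuildPos)
def pvOcc (n : Nat) : List String → String → List Nat
  | [], _ => []
  | y :: ys, v => if y == v then n :: pvOcc (n + 1) ys v else pvOcc (n + 1) ys v

theorem pvOcc_bounds : ∀ (l : List String) (n : Nat) (v : String) (e : Nat),
    e ∈ pvOcc n l v → n ≤ e ∧ e < n + l.length := by
  intro l
  induction l with
  | nil => intro n v e h; simp [pvOcc] at h
  | cons y ys ih =>
    intro n v e h
    simp only [pvOcc] at h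
    split_ifs at h with hy
    · rcases List.mem_cons.mp h with h | h
      · subst h; simp only [List.length_cons]; omega
      · have := ih (n + 1) v e h; simp only [List.length_cons]; omega
    · have := ih (n + 1) v e h; simp only [List.length_cons]; omega

theorem pvOcc_shift : ∀ (l : List String) (n : Nat) (v : String),
    pvOcc n l v = (pvOcc 0 l v).map (· + n) := by
  intro l
  induction l with
  | nil => intro n v; simp [pvOcc]
  | cons y ys ih =>
    intro n v
    simp only [pvOcc]
    split_ifs with hy
    · rw [ih (n + 1), ih 1]
      simp only [List.map_cons, List.map_map]
      refine List.cons_eq_cons.mpr ⟨by omega, List.map_congr_left fun a _ => by simp; omega⟩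
    · rw [ih (n + 1), ih 1]
      simp only [List.map_map]
      exact List.map_congr_left fun a _ => by simp; omega

theorem pvOcc_append : ∀ (a b : List String) (n : Nat) (v : String),
    pvOcc n (a ++ b) v = pvOcc n a v ++ pvOcc (n + a.length) b v := by
  intro a
  induction a with
  | nil => intro b n v; simp [pvOcc]
  | cons y ys ih =>
    intro b n v
    simp only [List.cons_append, pvOcc, List.length_cons]
    have harg : n + 1 + ys.length = n + (ys.length + 1) := by omega
    split_ifs with hy
    · rw [ih, harg]; simp
    · rw [ih, harg]

-- the greedy-scan recursion of pvIsSubseq, phrased via the first occurrence position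
theorem pvIsSubseq_cons : ∀ (ys : List String) (x : String) (xs : List String),
    pvIsSubseq (x :: xs) ys =
      (match pvOcc 0 ys x with
       | [] => false
       | k :: _ => pvIsSubseq xs (ys.drop (k + 1))) := by
  intro ys
  induction ys with
  | nil => intro x xs; simp [pvIsSubseq, pvOcc]
  | cons y ys ih =>
    intro x xs
    simp only [pvIsSubseq, pvOcc]
    by_cases hxy : x = y
    · subst hxy
      simp only [beq_self_eq_true, if_pos]
      rfl
    · have h1 : (x == y) = false := beq_eq_false_iff_ne.mpr hxy
      have h2 : (y == x) = false := beq_eq_false_iff_ne.mpr (Ne.symm hxy)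
      rw [h1, h2]
      simp only [if_neg Bool.false_ne_true]
      rw [ih x xs, pvOcc_shift ys 1]
      cases h0 : pvOcc 0 ys x with
      | nil => rfl
      | cons k ks => simp [List.drop_succ_cons]

-- binary search on a list split as "all < x" ++ "all ≥ x" lands exactly on the boundary
theorem pvBisect_split (x : Int) (a1 a2 : List Int)
    (h1 : ∀ e ∈ a1, e < x) (h2 : ∀ e ∈ a2, x ≤ e) :
    ∀ (n lo hi : Nat), hi - lo ≤ n → lo ≤ a1.length → a1.length ≤ hi →
      hi ≤ a1.length + a2.length → pvBisect (a1 ++ a2) x lo hi = a1.length := by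
  intro n
  induction n with
  | zero =>
    intro lo hi hn hlo hhi hlen
    rw [pvBisect]
    rw [dif_neg (by omega)]
    omega
  | succ n ih =>
    intro lo hi hn hlo hhi hlen
    rw [pvBisect]
    by_cases hlh : lo < hi
    · rw [dif_pos hlh]
      have hmid1 : lo ≤ (lo + hi) / 2 := by omega
      have hmid2 : (lo + hi) / 2 < hi := by omega
      by_cases hm : (lo + hi) / 2 < a1.length
      · -- mid is inside a1: element < x, search right
        have hget : (a1 ++ a2).getD ((lo + hi) / 2) 0 = a1[(lo + hi) / 2] := by
          rw [List.getD_eq_getElem?_getD, List.getElem?_append_left hm]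
          simp [List.getElem?_eq_getElem hm]
        rw [hget, if_pos (h1 _ (List.getElem_mem _))]
        exact ih ((lo + hi) / 2 + 1) hi (by omega) (by omega) (by omega) (by omega)
      · -- mid is inside a2: element ≥ x, search left
        have hm' : a1.length ≤ (lo + hi) / 2 := by omega
        have hm2 : (lo + hi) / 2 - a1.length < a2.length := by omega
        have hget : (a1 ++ a2).getD ((lo + hi) / 2) 0 = a2[(lo + hi) / 2 - a1.length] := by
          rw [List.getD_eq_getElem?_getD, List.getElem?_append_right hm']
          simp [List.getElem?_eq_getElem hm2]
        rw [hget, if_neg (by have := h2 _ (List.getElem_mem hm2); omega)]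
        exact ih lo ((lo + hi) / 2) (by omega) (by omega) (by omega) (by omega)
    · rw [dif_neg hlh]; omega

-- the positions dictionary holds, for each value, exactly its occurrence positions
theorem pvBuild_fold (v : String) : ∀ (l : List (Int × String)) (d : PySem.Dict String (List Int)),
    (l.foldl (fun d p => d.modify p.2 [] (· ++ [p.1])) d).getD v [] =
      d.getD v [] ++ (l.filter (fun p => p.2 == v)).map (·.1) := by
  intro l
  induction l with
  | nil => intro d; simp
  | cons p l ih =>
    intro d
    simp only [List.foldl_cons, List.filter_cons]
    rw [ih]
    by_cases hp : p.2 = v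
    · rw [if_pos (by simpa using hp)]
      rw [PySem.Dict.getD_modify]
      rw [if_pos hp.symm, hp]
      simp
    · rw [if_neg (by simpa using hp)]
      rw [PySem.Dict.getD_modify]
      rw [if_neg (fun h => hp h.symm)]

theorem pvEnum_filter (v : String) : ∀ (l : List String) (n : Nat),
    ((PySem.List.enumerate l (n : Int)).filter (fun p => p.2 == v)).map (·.1) =
      (pvOcc n l v).map (fun (i : Nat) => (i : Int)) := by
  intro l
  induction l with
  | nil => intro n; simp [PySem.List.enumerate_nil, pvOcc]
  | cons y ys ih =>
    intro n
    rw [PySem.List.enumerate_cons]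
    simp only [List.filter_cons, pvOcc]
    have hcast : ((n : Int) + 1) = ((n + 1 : Nat) : Int) := by push_cast; ring
    by_cases hy : y = v
    · rw [if_pos (by simpa using hy), if_pos (by simpa using hy)]
      simp only [List.map_cons]
      rw [hcast, ih (n + 1)]
    · rw [if_neg (by simpa using hy), if_neg (by simpa using hy)]
      rw [hcast, ih (n + 1)]

theorem pvBuildPos_getD (op_seq : List String) (v : String) :
    (pvBuildPos op_seq).getD v [] = (pvOcc 0 op_seq v).map (fun (i : Nat) => (i : Int)) := by
  unfold pvBuildPos
  rw [pvBuild_fold]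
  rw [PySem.Dict.getD_empty]
  have := pvEnum_filter v op_seq 0
  simpa using this

-- the main loop: greedy matching via the index equals the leftmost subsequence scan
theorem pvGreedy_eq (op_seq : List String) : ∀ (cp : List String) (m : Nat),
    pvGreedy (pvBuildPos op_seq) cp (m : Int) = pvIsSubseq cp (op_seq.drop m) := by
  intro cp
  induction cp with
  | nil => intro m; simp [pvGreedy, pvIsSubseq]
  | cons op rest ih =>
    intro m
    have hsplit : pvOcc 0 op_seq op =
        pvOcc 0 (op_seq.take m) op ++ (pvOcc 0 (op_seq.drop m) op).map (· + (op_seq.take m).length) := by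
      conv_lhs => rw [← List.take_append_drop m op_seq]
      rw [pvOcc_append, pvOcc_shift (op_seq.drop m)]
      simp
    set A1 := pvOcc 0 (op_seq.take m) op with hA1
    set O2 := pvOcc 0 (op_seq.drop m) op with hO2
    have hidxs : (pvBuildPos op_seq).getD op [] =
        A1.map (fun (i : Nat) => (i : Int)) ++ (O2.map (· + (op_seq.take m).length)).map (fun (i : Nat) => (i : Int)) := by
      rw [pvBuildPos_getD, hsplit, List.map_append]
    have ht : (op_seq.take m).length ≤ m := by simp
    -- boundary conditions for the binary search
    have hc1 : ∀ e ∈ A1.map (fun (i : Nat) => (i : Int)), e < (m : Int) := by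
      intro e he
      obtain ⟨a, ha, rfl⟩ := List.mem_map.mp he
      have := pvOcc_bounds _ 0 op a ha
      have : a < (op_seq.take m).length := by omega
      omega
    have hc2 : ∀ e ∈ (O2.map (· + (op_seq.take m).length)).map (fun (i : Nat) => (i : Int)), (m : Int) ≤ e := by
      intro e he
      obtain ⟨b, hb, rfl⟩ := List.mem_map.mp he
      obtain ⟨a, ha, rfl⟩ := List.mem_map.mp hb
      have hbd := pvOcc_bounds _ 0 op a ha
      have hne : op_seq.drop m ≠ [] := by
        intro h0; rw [h0] at hbd; simp at hbd
      have hmlen : m < op_seq.length := by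
        by_contra h0; exact hne (List.drop_eq_nil_of_le (by omega))
      have : (op_seq.take m).length = m := by simp; omega
      omega
    have hj := pvBisect_split (m : Int) (A1.map (fun (i : Nat) => (i : Int)))
        ((O2.map (· + (op_seq.take m).length)).map (fun (i : Nat) => (i : Int))) hc1 hc2
        (((pvBuildPos op_seq).getD op []).length) 0 (((pvBuildPos op_seq).getD op []).length)
        (by omega) (by simp) (by simp [hidxs]) (by simp [hidxs])
    simp only [pvGreedy]
    rw [← hidxs] at hj
    rw [hj]
    cases hO2c : O2 with
    | nil =>
      -- no occurrence of op at or after position m: both sides are False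
      have hlen : ((pvBuildPos op_seq).getD op []).length = (A1.map (fun (i : Nat) => (i : Int))).length := by
        rw [hidxs, hO2c]; simp
      rw [if_pos (by rw [hlen]; simp)]
      rw [pvIsSubseq_cons, ← hO2, hO2c]
    | cons k ks =>
      have hlen : (A1.map (fun (i : Nat) => (i : Int))).length < ((pvBuildPos op_seq).getD op []).length := by
        rw [hidxs, hO2c]; simp
      rw [if_neg (by simp only [beq_iff_eq]; omega)]
      -- the found element is the first occurrence ≥ m, namely k + m
      have hkO : k ∈ O2 := by rw [hO2c]; simp
      have hbd := pvOcc_bounds _ 0 op k (hO2 ▸ hkO)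
      have hne : op_seq.drop m ≠ [] := by
        intro h0; rw [h0] at hbd; simp at hbd
      have hmlen : m < op_seq.length := by
        by_contra h0; exact hne (List.drop_eq_nil_of_le (by omega))
      have htm : (op_seq.take m).length = m := by simp; omega
      have hget : ((pvBuildPos op_seq).getD op []).getD (A1.map (fun (i : Nat) => (i : Int))).length 0
          = ((k + m : Nat) : Int) := by
        rw [hidxs, List.getD_eq_getElem?_getD, List.getElem?_append_right (le_refl _)]
        simp [hO2c, htm]
      rw [hget]
      have hcast : ((k + m : Nat) : Int) + 1 = ((m + k + 1 : Nat) : Int) := by push_cast; ring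
      rw [hcast, ih (m + k + 1)]
      rw [pvIsSubseq_cons, ← hO2, hO2c]
      simp only [List.drop_drop]
      have harg : m + (k + 1) = m + k + 1 := by omega
      rw [harg]

-- ===== VERDICT (by name: the statement is the Claim_ definition above) =====
theorem isDuplicated_spec : Claim_equal_isDuplicated := by
  intro cp op _
  unfold Spec_isDuplicated isDuplicated isDuplicated_alt
  by_cases hin : PySem.Str.isIn (PySem.Str.join "," cp) (PySem.Str.join "," op) = true
  · rw [if_pos hin, if_pos hin]
  · have hcp : cp ≠ [] := by
      intro hnil
      subst hnil
      apply hin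
      rw [PySem.Str.isIn_iff_infix]
      have h0 : (PySem.Str.join "," ([] : List String)).toList = [] := by decide
      rw [h0]
      exact List.nil_infix
    rw [if_neg hin, if_neg hin]
    have halt : pvGreedy (pvBuildPos op) cp 0 = pvIsSubseq cp op := by
      have := pvGreedy_eq op cp 0
      simpa using this
    rw [halt]
    by_cases hlen : cp.length > op.length
    · rw [if_pos hlen]
      cases hsub : pvIsSubseq cp op with
      | false => rfl
      | true => exact absurd (pvIsSubseq_length_le cp op hsub) (by omega)
    · rw [if_neg hlen]
      by_cases hcnt : ((["1", "2", "3", "4"] : List String).any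
          (fun op_type => PySem.List.count op op_type < PySem.List.count cp op_type)) = true
      · rw [if_pos hcnt]
        cases hsub : pvIsSubseq cp op with
        | false => rfl
        | true =>
          exfalso
          rw [List.any_eq_true] at hcnt
          obtain ⟨t, _, ht⟩ := hcnt
          have := pvIsSubseq_count_le cp op t hsub
          simp only [PySem.List.count_eq, decide_eq_true_eq] at ht
          omega
      · rw [if_neg hcnt]
        exact pvALoop_eq_isSubseq op cp hcp
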